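-- pv_equiv track=rewrite | github.com/tayo5712/Algorithm | Python/baekjoon/no_class/tst.py | solution
-- ===== SOURCE A (Python) =====
-- def solution(n, colors):
--     # 각 색깔 블록의 개수를 세기 위한 딕셔너리 생성
--     count = {}
--     for color in colors:
--         if color not in count:
--             count[color] = 0
--         count[color] += 1
--
--     # 각 색깔 블록을 순회하며 가능한 최대 점수 계산
--     max_score = 0
--     for color, num_blocks in count.items():
--         max_score += num_blocks ** 2
--
--     return max_score
-- ===== SOURCE B (Python) =====
-- def solution(n, colors):
--     # one pass: sum of squares built incrementally via k^2 -> k^2 + (2k+1)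
--     total = 0
--     seen = {}
--     for c in colors:
--         k = seen.get(c, 0)
--         seen[c] = k + 1
--         total += 2 * k + 1
--     return total
-- ===== Notes on version B (the rewrite author's own statement) =====
-- stated objective: alternative
-- what changed: Replaces the two-pass count-then-square-each-frequency computation with a single pass that grows the total incrementally by 2k+1 (the odd-number identity (k+1)^2 = k^2 + 2k + 1), never squaring anything.
import Mathlib
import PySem

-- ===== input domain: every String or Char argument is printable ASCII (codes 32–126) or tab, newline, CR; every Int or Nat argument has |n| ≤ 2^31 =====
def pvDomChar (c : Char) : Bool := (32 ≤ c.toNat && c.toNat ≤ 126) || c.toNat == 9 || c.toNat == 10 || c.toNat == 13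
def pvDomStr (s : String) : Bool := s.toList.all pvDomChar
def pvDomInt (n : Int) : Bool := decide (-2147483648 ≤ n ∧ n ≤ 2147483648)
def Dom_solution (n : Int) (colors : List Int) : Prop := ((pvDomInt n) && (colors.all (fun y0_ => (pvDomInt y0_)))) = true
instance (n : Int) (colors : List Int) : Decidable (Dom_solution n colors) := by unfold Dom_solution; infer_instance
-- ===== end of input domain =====

-- B replaces A's two passes (count every color, then square each frequency) with one pass that
-- grows the total by 2k+1 each time a color is seen for the (k+1)-st time; same O(n) cost.

-- ===== PORT A =====
-- count = {}; for color in colors: if color not in count: count[color] = 0; count[color] += 1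
-- max_score = 0; for color, num_blocks in count.items(): max_score += num_blocks ** 2
def solution (n : Int) (colors : List Int) : Int :=
  let count : PySem.Dict Int Int :=
    colors.foldl (fun d color =>
      let d := if d.contains color then d else d.insert color 0
      d.insert color (d.getD color 0 + 1)) PySem.Dict.empty
  count.items.foldl (fun maxScore p => maxScore + p.2 ^ 2) 0

-- ===== PORT B =====
-- total = 0; seen = {}; for c in colors: k = seen.get(c, 0); seen[c] = k + 1; total += 2*k + 1
def solution_alt (n : Int) (colors : List Int) : Int :=
  (colors.foldl (fun st c =>
      (st.1.insert c (st.1.getD c 0 + 1), st.2 + 2 * st.1.getD c 0 + 1))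
    ((PySem.Dict.empty : PySem.Dict Int Int), (0 : Int))).2

-- ===== PRECONDITION & SPEC =====
def Spec_solution (n : Int) (colors : List Int) (out : Int) : Prop := out = solution_alt n colors
instance (n : Int) (colors : List Int) (out : Int) : Decidable (Spec_solution n colors out) := by unfold Spec_solution; infer_instance

-- ===== CLAIM (what is proved, stated in full; the proofs are below) =====
def Claim_equal_solution : Prop := ∀ (n : Int) (colors : List Int), Dom_solution n colors → Spec_solution n colors (solution n colors)

-- ===== LEMMAS AND PROOFS =====

-- the common value: sum over the distinct colors of (count)^2
def sqSum (xs : List Int) : Int :=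
  ((PySem.Set.ofList xs).map (fun k => ((xs.count k : Int)) ^ 2)).sum

-- A's counting step is exactly 'insert color (getD color 0 + 1)'
lemma stepA_eq (d : PySem.Dict Int Int) (c : Int) :
    (let d' := if d.contains c then d else d.insert c 0
     d'.insert c (d'.getD c 0 + 1)) = d.insert c (d.getD c 0 + 1) := by
  by_cases h : d.contains c
  · simp [h]
  · simp only [Bool.not_eq_true] at h
    simp [h, PySem.Dict.getD_insert_self, PySem.Dict.insert_insert_self,
      PySem.Dict.getD_of_not_contains _ _ h]

lemma solution_eq_sqSum (n : Int) (colors : List Int) : solution n colors = sqSum colors := by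
  unfold solution
  have h1 : colors.foldl (fun d color =>
      let d := if d.contains color then d else d.insert color 0
      d.insert color (d.getD color 0 + 1)) PySem.Dict.empty
      = PySem.Dict.counter colors := by
    rw [← PySem.Dict.foldl_insert_getD_add_one_eq_counter]
    exact PySem.List.foldl_congr_mem _ _ _ _ (fun d c _ => stepA_eq d c)
  rw [h1]
  show (PySem.Dict.counter colors).items.foldl (fun maxScore p => maxScore + p.2 ^ 2) 0 = sqSum colors
  rw [PySem.List.foldl_add (PySem.Dict.counter colors).items (fun p => (p.2 : Int) ^ 2) 0, PySem.Dict.items_counter]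
  simp [sqSum, Function.comp_def]

-- projection: B's dict component is the counting fold
lemma B_fst (xs : List Int) (d : PySem.Dict Int Int) (t : Int) :
    (xs.foldl (fun st c =>
      (st.1.insert c (st.1.getD c 0 + 1), st.2 + 2 * st.1.getD c 0 + 1)) (d, t)).1
    = xs.foldl (fun d c => d.insert c (d.getD c 0 + 1)) d := by
  induction xs generalizing d t with
  | nil => rfl
  | cons x xs ih => simpa using ih (d.insert x (d.getD x 0 + 1)) (t + 2 * d.getD x 0 + 1)

-- a sum over a Nodup list of a function changed only at one member c ∈ s
lemma sum_map_change_one (s : List Int) (c : Int) (g g' : Int → Int)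
    (hnd : s.Nodup) (hc : c ∈ s) (hne : ∀ k ∈ s, k ≠ c → g' k = g k) :
    (s.map g').sum = (s.map g).sum + (g' c - g c) := by
  induction s with
  | nil => cases hc
  | cons a s ih =>
    rcases List.mem_cons.mp hc with rfl | hc'
    · have hmap : s.map g' = s.map g := by
        apply List.map_congr_left
        intro k hk
        exact hne k (List.mem_cons_of_mem _ hk) (fun h => (List.nodup_cons.mp hnd).1 (h ▸ hk))
      simp [hmap]; ring
    · have ha : a ≠ c := fun h => (List.nodup_cons.mp hnd).1 (h ▸ hc')
      have := ih (List.nodup_cons.mp hnd).2 hc' (fun k hk => hne k (List.mem_cons_of_mem _ hk))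
      simp [this, hne a (List.mem_cons_self ..) ha]; ring

lemma sqSum_append (xs : List Int) (c : Int) :
    sqSum (xs ++ [c]) = sqSum xs + 2 * xs.count c + 1 := by
  unfold sqSum
  rw [PySem.Set.ofList_append_singleton]
  by_cases h : c ∈ xs
  · have hcs : c ∈ PySem.Set.ofList xs := (PySem.Set.mem_ofList _ _).mpr h
    rw [PySem.Set.add_of_mem hcs]
    rw [sum_map_change_one (PySem.Set.ofList xs) c
        (fun k => ((xs.count k : Int)) ^ 2) (fun k => (((xs ++ [c]).count k : Int)) ^ 2)
        (PySem.Set.nodup_ofList _) hcs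
        (fun k _ hk => by simp [List.count_append, Ne.symm hk])]
    simp [List.count_append]
    ring
  · have hcs : c ∉ PySem.Set.ofList xs := fun hh => h ((PySem.Set.mem_ofList _ _).mp hh)
    rw [PySem.Set.add_of_not_mem hcs, List.map_append, List.sum_append]
    have hmap : (PySem.Set.ofList xs).map (fun k => (((xs ++ [c]).count k : Int)) ^ 2)
        = (PySem.Set.ofList xs).map (fun k => ((xs.count k : Int)) ^ 2) := by
      apply List.map_congr_left
      intro k hk
      have hkc : k ≠ c := fun hkc => hcs (hkc ▸ hk)
      simp [List.count_append, Ne.symm hkc]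
    rw [hmap]
    simp [List.count_append, List.count_eq_zero_of_not_mem h]

lemma solution_alt_eq_sqSum (n : Int) (colors : List Int) : solution_alt n colors = sqSum colors := by
  unfold solution_alt
  induction colors using List.reverseRecOn with
  | nil => simp [sqSum]
  | append_singleton xs c ih =>
    rw [List.foldl_append]
    simp only [List.foldl_cons, List.foldl_nil]
    rw [sqSum_append, ← ih, B_fst]
    have hg : (xs.foldl (fun d c => d.insert c (d.getD c 0 + 1)) PySem.Dict.empty).getD c 0
        = (xs.count c : Int) := by
      rw [PySem.Dict.getD_foldl_insert_add_one xs PySem.Dict.empty c]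
      simp
    rw [hg]

-- ===== VERDICT (by name: the statement is the Claim_ definition above) =====
theorem solution_spec : Claim_equal_solution := by
  intro n colors _
  unfold Spec_solution
  rw [solution_eq_sqSum, solution_alt_eq_sqSum]
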